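-- pv_equiv track=rewrite | github.com/hoevelek/labelled_numerics | labelled_numerics/roman_numbers/roman_numbers.py | formate_nice_roman
-- ===== SOURCE A (Python) =====
-- def formate_nice_roman(roman_number: str) -> str:
--     """Format roman number to be used in conversion_dict
--     :param roman_no: roman number
--     :type roman_no: str
--     :return: formatted roman number
--     :rtype: str
--     """
--     # group as long as follwoing char is equal to current char, e.g. C C C -> CCC
--     rom_no_out = ""
--     mem = "?"
--     for char in roman_number.split():
--         if char != " ":
--             if char == mem:
--                 rom_no_out += char
--             else:
--                 rom_no_out += " " + char
--             mem = char
--         if (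
--             char == "."
--         ):  # do not format after dot . III : .3 and .I I I: .111 are different and expected to be typed in correctly
--             rom_no_out += roman_number.split(".")[1]
--             break
--     return rom_no_out.strip()
-- ===== SOURCE B (Python) =====
-- def formate_nice_roman(roman_number: str) -> str:
--     """Format roman number to be used in conversion_dict (run-length grouping version)."""
--     tokens = roman_number.split()
--     tail = ""
--     if "." in tokens:
--         tokens = tokens[: tokens.index(".") + 1]
--         tail = roman_number.split(".")[1]
--     pieces = []
--     i = 0
--     n = len(tokens)
--     while i < n:
--         j = i
--         while j < n and tokens[j] == tokens[i]:
--             j += 1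
--         pieces.append(tokens[i] * (j - i))
--         i = j
--     return (" ".join(pieces) + tail).strip()
-- ===== Notes on version B (the rewrite author's own statement) =====
-- stated objective: alternative
-- what changed: A threads a `mem` flag through a token-by-token loop with in-place string concatenation and a break at the '.' token; B first truncates the token list at the first '.' token, then cuts it into maximal runs of equal tokens, renders each run as one piece (token repeated run-length times) and joins the pieces with single spaces.
import Mathlib
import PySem

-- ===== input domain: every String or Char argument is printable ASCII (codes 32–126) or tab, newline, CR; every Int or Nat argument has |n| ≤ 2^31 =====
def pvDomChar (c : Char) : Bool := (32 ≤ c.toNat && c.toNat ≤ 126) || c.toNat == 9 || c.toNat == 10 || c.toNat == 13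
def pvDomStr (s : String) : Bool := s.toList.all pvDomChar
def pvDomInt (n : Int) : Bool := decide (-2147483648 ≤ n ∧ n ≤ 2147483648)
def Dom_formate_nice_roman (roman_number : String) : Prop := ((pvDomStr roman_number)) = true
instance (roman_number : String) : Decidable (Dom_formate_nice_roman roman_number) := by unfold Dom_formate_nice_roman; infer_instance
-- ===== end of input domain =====

-- B replaces A's token-by-token `mem`-flag loop by run-length grouping (cut the token list into
-- maximal runs of equal tokens, emit each run as one piece, join the pieces with single spaces);
-- objective: alternative decomposition, same cost.

-- ===== PORT A =====
-- roman_number.split(".")[1]; A only evaluates it when a "." token exists, so index 1 is present (exact there)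
def pvTailDot (cs : List Char) : List Char :=
  (PySem.Chars.splitOn cs ['.']).getD 1 []

-- the `for char in roman_number.split(): …` loop with its `break`
def pvALoop (tail : List Char) : List (List Char) → List Char → List Char → List Char
  | [], out, _ => out
  | c :: rest, out, mem =>
    let om : List Char × List Char :=
      if c ≠ [' '] then (if c = mem then out ++ c else out ++ ' ' :: c, c) else (out, mem)
    if c = ['.'] then om.1 ++ tail
    else pvALoop tail rest om.1 om.2

def formate_nice_roman (roman_number : String) : String :=
  String.mk (PySem.Chars.strip
    (pvALoop (pvTailDot roman_number.toList) (PySem.Chars.split₀ roman_number.toList) [] ['?']))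

-- ===== PORT B =====
-- inner `while run < len(tokens) and tokens[run] == head: run += 1` (length of the leading run in rest)
def pvRunLen (head : List Char) : List (List Char) → Nat
  | [] => 0
  | c :: rest => if c = head then pvRunLen head rest + 1 else 0

-- outer `while tokens: … pieces.append(head * run); tokens = tokens[run:]`
def pvBLoop : List (List Char) → List (List Char) → List (List Char)
  | [], pieces => pieces
  | head :: rest, pieces =>
    let run := 1 + pvRunLen head rest
    pvBLoop (List.drop run (head :: rest)) (pieces ++ [(List.replicate run head).flatten])
termination_by toks _ => toks.length
decreasing_by simp [List.length_drop]

def formate_nice_roman_alt (roman_number : String) : String :=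
  let toks0 := PySem.Chars.split₀ roman_number.toList
  let hasDot := decide (['.'] ∈ toks0)
  let toks := if hasDot then toks0.take (((PySem.List.index? toks0 ['.']).getD 0) + 1) else toks0
  let tail := if hasDot then pvTailDot roman_number.toList else []
  String.mk (PySem.Chars.strip (PySem.Chars.join [' '] (pvBLoop toks []) ++ tail))

-- ===== PRECONDITION & SPEC =====
def Spec_formate_nice_roman (roman_number : String) (out : String) : Prop := out = formate_nice_roman_alt roman_number
instance (roman_number : String) (out : String) : Decidable (Spec_formate_nice_roman roman_number out) := by unfold Spec_formate_nice_roman; infer_instance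

-- ===== CLAIM (what is proved, stated in full; the proofs are below) =====
def Claim_equal_formate_nice_roman : Prop := ∀ (roman_number : String), Dom_formate_nice_roman roman_number → Spec_formate_nice_roman roman_number (formate_nice_roman roman_number)

-- ===== LEMMAS AND PROOFS =====

-- the delta appended by A's loop (`out` removed from the state)
def pvD (tail : List Char) : List (List Char) → List Char → List Char
  | [], _ => []
  | c :: rest, mem =>
    let piece := if c ≠ [' '] then (if c = mem then c else ' ' :: c) else []
    let mem' := if c ≠ [' '] then c else mem
    if c = ['.'] then piece ++ tail else piece ++ pvD tail rest mem'

-- reference: grouped rendering, first token without leading space, stop at the first "." token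
def pvG (tail : List Char) : List (List Char) → List Char
  | [] => []
  | c :: rest =>
    c ++ (if c = ['.'] then tail
          else (match rest with
                | [] => []
                | c2 :: _ => (if c2 = c then [] else [' ']) ++ pvG tail rest))

-- leading separator contributed by the comparison of the first token against `mem`
def pvPre (toks : List (List Char)) (mem : List Char) : List Char :=
  match toks with
  | [] => []
  | c :: _ => if c = mem then [] else [' ']

-- B's join written as one recursion over the token list
def pvJ : List (List Char) → List Char
  | [] => []
  | head :: rest =>
    let k := pvRunLen head rest
    (List.replicate (1 + k) head).flatten ++
      (if rest.drop k = [] then [] else ' ' :: pvJ (rest.drop k))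
termination_by toks => toks.length
decreasing_by simp [List.length_drop]

theorem pvALoop_delta (tail : List Char) (toks : List (List Char)) :
    ∀ out mem, pvALoop tail toks out mem = out ++ pvD tail toks mem := by
  induction toks with
  | nil => intro out mem; simp [pvALoop, pvD]
  | cons c rest ih =>
    intro out mem
    simp only [pvALoop, pvD]
    by_cases hs : c = [' '] <;> by_cases hd : c = ['.'] <;> by_cases hm : c = mem <;>
      simp only [hs, hd, hm, if_pos, if_neg, ite_true, ite_false, ne_eq, not_true_eq_false,
        not_false_eq_true, ih, List.append_assoc, List.append_nil] <;> simp_all [ih]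

theorem pvD_eq_pre_G (tail : List Char) (toks : List (List Char))
    (wf : ∀ t ∈ toks, t ≠ [' ']) :
    ∀ mem, pvD tail toks mem = pvPre toks mem ++ pvG tail toks := by
  induction toks with
  | nil => intro mem; simp [pvD, pvPre, pvG]
  | cons c rest ih =>
    intro mem
    have hc : c ≠ [' '] := wf c (by simp)
    have wf' : ∀ t ∈ rest, t ≠ [' '] := fun t ht => wf t (by simp [ht])
    simp only [pvD, pvG, pvPre, if_pos hc, hc, ne_eq, not_false_eq_true, ite_true, ih wf']
    by_cases hd : c = ['.'] <;> by_cases hm : c = mem <;>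
      rcases rest with _ | ⟨c2, r2⟩ <;>
        first
          | simp_all [pvPre, pvG]
          | (by_cases h2 : c2 = c <;> simp_all [pvPre] <;> split_ifs <;> simp_all)

theorem pvBLoop_acc (toks : List (List Char)) :
    ∀ pieces, pvBLoop toks pieces = pieces ++ pvBLoop toks [] := by
  induction toks using pvJ.induct with
  | case1 => intro pieces; simp [pvBLoop]
  | case2 head rest k ih =>
    intro pieces
    rw [pvBLoop, pvBLoop]
    simp only [Nat.add_comm 1 (pvRunLen head rest), List.drop_succ_cons]
    rw [ih, ih ([] ++ _)]
    simp [List.append_assoc]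

theorem join_cons (p : List Char) (ps : List (List Char)) :
    PySem.Chars.join [' '] (p :: ps) =
      p ++ (if ps = [] then [] else ' ' :: PySem.Chars.join [' '] ps) := by
  cases ps <;> simp [PySem.Chars.join, List.intercalate]

theorem join_pvBLoop (toks : List (List Char)) :
    PySem.Chars.join [' '] (pvBLoop toks []) = pvJ toks := by
  induction toks using pvJ.induct with
  | case1 => simp [pvBLoop, pvJ, PySem.Chars.join, List.intercalate]
  | case2 head rest k ih =>
    rw [pvBLoop, pvJ]
    rw [pvBLoop_acc]
    simp only [Nat.add_comm 1 (pvRunLen head rest), List.drop_succ_cons, List.nil_append, List.singleton_append]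
    rw [join_cons]
    rcases h : List.drop (pvRunLen head rest) rest with _ | ⟨t, ts⟩
    · have : pvBLoop (List.drop (pvRunLen head rest) rest) [] = [] := by
        rw [h, pvBLoop]
      simp [h, pvBLoop]
    · have hB : pvBLoop (List.drop (pvRunLen head rest) rest) [] ≠ [] := by
        rw [h, pvBLoop, pvBLoop_acc]; simp
      rw [h] at hB ih
      simp [hB, ih]

theorem pvJ_step (c : List Char) (rest : List (List Char)) :
    pvJ (c :: rest) = c ++ pvPre rest c ++ pvJ rest := by
  rcases rest with _ | ⟨c2, r2⟩
  · simp [pvJ, pvRunLen, pvPre]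
  · by_cases h2 : c2 = c
    · subst h2
      rw [pvJ, pvJ]
      simp only [pvRunLen, if_pos rfl, pvPre, ite_true]
      simp [List.replicate_succ, Nat.add_comm 1, List.drop_succ_cons, List.append_assoc]
    · rw [pvJ]
      simp [pvRunLen, h2, pvPre]

theorem pvG_step (tail c : List Char) (rest : List (List Char)) (hc : c ≠ ['.']) :
    pvG tail (c :: rest) = c ++ pvPre rest c ++ pvG tail rest := by
  rcases rest with _ | ⟨c2, r2⟩
  · simp [pvG, pvPre, hc]
  · by_cases h2 : c2 = c <;> simp [pvG, pvPre, hc, h2]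

theorem pvJ_eq_G_nodot (tail : List Char) (toks : List (List Char))
    (h : ['.'] ∉ toks) : pvJ toks = pvG tail toks := by
  induction toks with
  | nil => simp [pvJ, pvG]
  | cons c rest ih =>
    have hc : c ≠ ['.'] := by intro e; exact h (by simp [e])
    have h' : ['.'] ∉ rest := fun m => h (by simp [m])
    rw [pvJ_step, pvG_step tail c rest hc, ih h']

theorem pvJ_eq_G_dot (tail : List Char) (toks : List (List Char))
    (h : ['.'] ∈ toks) :
    pvJ (toks.take (((PySem.List.index? toks ['.']).getD 0) + 1)) ++ tail = pvG tail toks := by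
  induction toks with
  | nil => simp at h
  | cons c rest ih =>
    by_cases hc : c = ['.']
    · subst hc
      rw [PySem.List.index?_cons_self]
      simp only [Option.getD_some, List.take_succ_cons, List.take_zero]
      simp [pvG, pvJ, pvRunLen]
    · have hm : ['.'] ∈ rest := by rcases List.mem_cons.mp h with e | m; exacts [absurd e.symm hc, m]
      rw [PySem.List.index?_cons_of_ne rest hc]
      rcases hi : PySem.List.index? rest ['.'] with _ | i
      · exact absurd ((PySem.List.index?_eq_none_iff rest ['.']).mp hi) (not_not_intro hm)
      · rcases rest with _ | ⟨c2, r2⟩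
        · simp at hm
        · rw [hi] at ih
          simp only [Option.map_some, Option.getD_some] at ih ⊢
          have hih := ih hm
          simp only [List.take_succ_cons] at hih ⊢
          rw [pvJ_step, pvG_step tail c (c2 :: r2) hc, ← hih]
          have hpre : pvPre (c2 :: List.take i r2) c = pvPre (c2 :: r2) c := rfl
          rw [hpre]
          simp [List.append_assoc]

theorem split₀_go_nospace (s : List Char) : ∀ (cur : List Char) (acc : List (List Char)),
    (∀ ch ∈ cur, ¬ PySem.Chars.isspace ch) →
    (∀ t ∈ acc, ∀ ch ∈ t, ¬ PySem.Chars.isspace ch) →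
    ∀ t ∈ PySem.Chars.split₀.go s cur acc, ∀ ch ∈ t, ¬ PySem.Chars.isspace ch := by
  induction s with
  | nil =>
    intro cur acc hcur hacc t ht
    rw [PySem.Chars.split₀.go] at ht
    split_ifs at ht with h
    · simp at ht; exact hacc t ht
    · simp at ht
      rcases ht with ht | ht
      · exact hacc t ht
      · intro ch hch; subst ht; exact fun hs => hcur ch (by simpa using hch) hs
  | cons c rest ih =>
    intro cur acc hcur hacc t ht
    rw [PySem.Chars.split₀.go] at ht
    split_ifs at ht with h1 h2
    · exact ih [] acc (by simp) hacc t ht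
    · refine ih [] _ (by simp) ?_ t ht
      intro u hu
      simp at hu
      rcases hu with hu | hu
      · intro ch hch; rw [hu] at hch; exact hcur ch (by simpa using hch)
      · exact hacc u hu
    · refine ih (c :: cur) acc ?_ hacc t ht
      intro ch hch
      rcases List.mem_cons.mp hch with e | m
      · rw [e]; simp [h1]
      · exact hcur ch m

theorem split₀_no_space_token (cs : List Char) :
    ∀ t ∈ PySem.Chars.split₀ cs, t ≠ [' '] := by
  intro t ht he
  have := split₀_go_nospace cs [] [] (by simp) (by simp) t ht ' ' (by simp [he])
  exact this (by decide)

theorem strip_space_cons (x : List Char) :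
    PySem.Chars.strip (' ' :: x) = PySem.Chars.strip x := by
  simp [PySem.Chars.strip, PySem.Chars.lstrip, List.dropWhile_cons, show PySem.Chars.isspace ' ' = true from by decide]

theorem strip_pre (toks : List (List Char)) (mem x : List Char) :
    PySem.Chars.strip (pvPre toks mem ++ x) = PySem.Chars.strip x := by
  rcases toks with _ | ⟨c, r⟩
  · simp [pvPre]
  · by_cases h : c = mem <;> simp [pvPre, h, strip_space_cons]

-- ===== VERDICT (by name: the statement is the Claim_ definition above) =====
theorem formate_nice_roman_spec : Claim_equal_formate_nice_roman := by
  intro roman_number _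
  unfold Spec_formate_nice_roman formate_nice_roman formate_nice_roman_alt
  rw [pvALoop_delta]
  rw [pvD_eq_pre_G _ _ (split₀_no_space_token roman_number.toList)]
  rw [List.nil_append, strip_pre]
  by_cases hdot : ['.'] ∈ PySem.Chars.split₀ roman_number.toList
  · simp only [hdot, decide_true, if_true, join_pvBLoop]
    rw [pvJ_eq_G_dot (pvTailDot roman_number.toList) _ hdot]
  · simp only [hdot, decide_false, Bool.false_eq_true, if_false, join_pvBLoop, List.append_nil]
    rw [pvJ_eq_G_nodot (pvTailDot roman_number.toList) _ hdot]
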